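-- pv_equiv track=rewrite | github.com/benjaminsnorris/storyforge | scripts/lib/python/storyforge/structural.py | _classify_arc_shape
-- ===== SOURCE A (Python) =====
-- _POSITIVE_SHIFTS = {'-/+', '+/+', '+/++'}
--
-- _NEGATIVE_SHIFTS = {'+/-', '-/--', '-/-'}
--
-- def _classify_arc_shape(shifts):
--     """Classify a character's value_shift sequence into a Reagan archetype.
--
--     Maps each shift to positive/negative valence, counts sign reversals,
--     and classifies into one of six shapes.
--
--     Args:
--         shifts: list of value_shift strings (e.g. ['+/-', '-/+', '+/-'])
--
--     Returns:
--         (shape_name, reversal_count, is_compound)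
--     """
--     # Map shifts to valence: +1, -1, or 0 (unknown/empty)
--     valences = []
--     for s in shifts:
--         s = s.strip()
--         if s in _POSITIVE_SHIFTS:
--             valences.append(1)
--         elif s in _NEGATIVE_SHIFTS:
--             valences.append(-1)
--         else:
--             valences.append(0)
--
--     # Filter out zero-valence for reversal counting
--     nonzero = [v for v in valences if v != 0]
--
--     if not nonzero:
--         return ('flat', 0, False)
--
--     # Count reversals: consecutive non-zero valences that change sign
--     reversals = 0
--     for i in range(1, len(nonzero)):
--         if nonzero[i] != nonzero[i - 1]:
--             reversals += 1
--
--     # Classify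
--     positive_count = sum(1 for v in nonzero if v > 0)
--     negative_count = sum(1 for v in nonzero if v < 0)
--     mostly_positive = positive_count >= negative_count
--     ends_positive = nonzero[-1] > 0
--
--     is_compound = reversals >= 2
--
--     if reversals == 0:
--         shape = 'rags-to-riches' if mostly_positive else 'tragedy'
--     elif reversals == 1:
--         # First half determines shape
--         half = len(nonzero) // 2 or 1
--         first_half_negative = sum(1 for v in nonzero[:half] if v < 0) > sum(1 for v in nonzero[:half] if v > 0)
--         shape = 'man-in-a-hole' if first_half_negative else 'icarus'
--     else:
--         shape = 'cinderella' if ends_positive else 'oedipus'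
--
--     return (shape, reversals, is_compound)
-- ===== SOURCE B (Python) =====
-- _POSITIVE_SHIFTS = {'-/+', '+/+', '+/++'}
--
-- _NEGATIVE_SHIFTS = {'+/-', '-/--', '-/-'}
--
-- def _classify_arc_shape(shifts):
--     """One-pass classification: derive valences, reversals, counts and the
--     last sign while scanning the shifts once, then branch as specified."""
--     nonzero = []
--     reversals = 0
--     positive_count = 0
--     negative_count = 0
--     last = 0
--     for s in shifts:
--         t = s.strip()
--         if t in _POSITIVE_SHIFTS:
--             v = 1
--         elif t in _NEGATIVE_SHIFTS:
--             v = -1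
--         else:
--             continue
--         if last and v != last:
--             reversals += 1
--         if v > 0:
--             positive_count += 1
--         else:
--             negative_count += 1
--         nonzero.append(v)
--         last = v
--     if not nonzero:
--         return ('flat', 0, False)
--     is_compound = reversals >= 2
--     if reversals == 0:
--         shape = 'rags-to-riches' if positive_count >= negative_count else 'tragedy'
--     elif reversals == 1:
--         half = len(nonzero) // 2 or 1
--         # entries are +/-1, so "more negatives than positives" == negative sum
--         shape = 'man-in-a-hole' if sum(nonzero[:half]) < 0 else 'icarus'
--     else:
--         shape = 'cinderella' if last > 0 else 'oedipus'
--     return (shape, reversals, is_compound)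
-- ===== Notes on version B (the rewrite author's own statement) =====
-- stated objective: alternative
-- what changed: Replaces A's five separate passes (valence map, zero filter, reversal index loop, two count sums) with a single fused scan maintaining nonzero, reversals, sign counts and last sign, and decides the reversals==1 branch by the sign of sum(nonzero[:half]) instead of comparing two counts.
import Mathlib
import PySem

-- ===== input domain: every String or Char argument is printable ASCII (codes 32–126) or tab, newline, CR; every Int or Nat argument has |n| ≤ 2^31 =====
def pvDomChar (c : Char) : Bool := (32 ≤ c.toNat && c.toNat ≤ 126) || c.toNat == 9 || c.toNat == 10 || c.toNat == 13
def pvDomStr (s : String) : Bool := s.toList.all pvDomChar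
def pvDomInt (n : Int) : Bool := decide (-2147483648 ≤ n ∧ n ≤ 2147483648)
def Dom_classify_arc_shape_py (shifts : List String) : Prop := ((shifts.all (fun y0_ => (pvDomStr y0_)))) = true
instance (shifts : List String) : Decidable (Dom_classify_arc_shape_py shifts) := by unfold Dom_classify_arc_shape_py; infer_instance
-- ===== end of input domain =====

-- B fuses A's separate passes (valence map, zero filter, reversal index loop, two count sums)
-- into one scan and decides the reversals==1 branch by the sign of the first-half sum; objective: alternative.

-- ===== PORT A =====
-- the module constants _POSITIVE_SHIFTS / _NEGATIVE_SHIFTS (Python set literals, distinct elements)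
def pvPos : PySem.Set String := ["-/+", "+/+", "+/++"]

def pvNeg : PySem.Set String := ["+/-", "-/--", "-/-"]

def classify_arc_shape_py (shifts : List String) : String × Int × Bool :=
  let valences : List Int := shifts.foldl (fun acc s =>
    let t := PySem.Str.strip s
    if pvPos.contains t then acc ++ [1]
    else if pvNeg.contains t then acc ++ [(-1 : Int)]
    else acc ++ [0]) []
  let nonzero := valences.filter (fun v => decide (v ≠ 0))
  if nonzero.isEmpty then ("flat", 0, false)
  else
    let reversals : Int := (PySem.List.pyRange 1 (nonzero.length : Int) 1).foldl
      (fun r i => if PySem.List.pyGetD nonzero i 0 ≠ PySem.List.pyGetD nonzero (i - 1) 0 then r + 1 else r) 0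
    let positive_count : Int := ((nonzero.filter (fun v => decide (0 < v))).map (fun _ => (1 : Int))).sum
    let negative_count : Int := ((nonzero.filter (fun v => decide (v < 0))).map (fun _ => (1 : Int))).sum
    let is_compound := decide (2 ≤ reversals)
    let shape :=
      if reversals = 0 then (if negative_count ≤ positive_count then "rags-to-riches" else "tragedy")
      else if reversals = 1 then
        let half0 : Int := PySem.Int.floordiv (nonzero.length : Int) 2
        let half : Int := if half0 = 0 then 1 else half0
        let fh := PySem.List.slice nonzero none (some half)
        let fhn : Int := ((fh.filter (fun v => decide (v < 0))).map (fun _ => (1 : Int))).sum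
        let fhp : Int := ((fh.filter (fun v => decide (0 < v))).map (fun _ => (1 : Int))).sum
        if fhp < fhn then "man-in-a-hole" else "icarus"
      else (if 0 < PySem.List.pyGetD nonzero (-1) 0 then "cinderella" else "oedipus")
    (shape, reversals, is_compound)

-- ===== PORT B =====
-- the body of B's loop once a nonzero valence v is found
def pvUpd (st : List Int × Int × Int × Int × Int) (v : Int) : List Int × Int × Int × Int × Int :=
  match st with
  | (nonzero, reversals, pc, nc, last) =>
    (nonzero ++ [v],
     (if last ≠ 0 ∧ v ≠ last then reversals + 1 else reversals),
     (if 0 < v then pc + 1 else pc),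
     (if 0 < v then nc else nc + 1),
     v)

def pvStepB (st : List Int × Int × Int × Int × Int) (s : String) : List Int × Int × Int × Int × Int :=
  let t := PySem.Str.strip s
  if pvPos.contains t then pvUpd st 1
  else if pvNeg.contains t then pvUpd st (-1)
  else st

def classify_arc_shape_py_alt (shifts : List String) : String × Int × Bool :=
  match shifts.foldl pvStepB ([], 0, 0, 0, 0) with
  | (nonzero, reversals, pc, nc, last) =>
    if nonzero.isEmpty then ("flat", 0, false)
    else
      let is_compound := decide (2 ≤ reversals)
      let shape :=
        if reversals = 0 then (if nc ≤ pc then "rags-to-riches" else "tragedy")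
        else if reversals = 1 then
          let half0 : Int := PySem.Int.floordiv (nonzero.length : Int) 2
          let half : Int := if half0 = 0 then 1 else half0
          if (PySem.List.slice nonzero none (some half)).sum < 0 then "man-in-a-hole" else "icarus"
        else (if 0 < last then "cinderella" else "oedipus")
      (shape, reversals, is_compound)

-- ===== PRECONDITION & SPEC =====
def Spec_classify_arc_shape_py (shifts : List String) (out : String × Int × Bool) : Prop := out = classify_arc_shape_py_alt shifts
instance (shifts : List String) (out : String × Int × Bool) : Decidable (Spec_classify_arc_shape_py shifts out) := by unfold Spec_classify_arc_shape_py; infer_instance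

-- ===== CLAIM (what is proved, stated in full; the proofs are below) =====
def Claim_equal_classify_arc_shape_py : Prop := ∀ (shifts : List String), Dom_classify_arc_shape_py shifts → Spec_classify_arc_shape_py shifts (classify_arc_shape_py shifts)

-- ===== LEMMAS AND PROOFS =====

-- valence of one shift string
def pvVal (s : String) : Int :=
  let t := PySem.Str.strip s
  if pvPos.contains t then 1 else if pvNeg.contains t then -1 else 0

-- the nonzero valence sequence both programs work on
def pvNZ (shifts : List String) : List Int := (shifts.map pvVal).filter (fun v => decide (v ≠ 0))

-- sign reversals of last :: l, counting only from a nonzero last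
def pvRevFrom : Int → List Int → Int
  | _, [] => 0
  | last, x :: xs => (if last ≠ 0 ∧ x ≠ last then 1 else 0) + pvRevFrom x xs

-- last element of l, defaulting to the first argument
def pvLastD : Int → List Int → Int
  | last, [] => last
  | _, x :: xs => pvLastD x xs

-- common normal form of both programs, as a function of the nonzero valence list
def pvCanon (nz : List Int) : String × Int × Bool :=
  if nz.isEmpty then ("flat", 0, false)
  else
    let reversals := pvRevFrom 0 nz
    let pc : Int := (nz.countP (fun v => decide (0 < v)) : Int)
    let nc : Int := (nz.countP (fun v => decide (v < 0)) : Int)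
    let shape :=
      if reversals = 0 then (if nc ≤ pc then "rags-to-riches" else "tragedy")
      else if reversals = 1 then
        let half0 : Int := PySem.Int.floordiv (nz.length : Int) 2
        let half : Int := if half0 = 0 then 1 else half0
        let fh := PySem.List.slice nz none (some half)
        if ((fh.countP (fun v => decide (0 < v)) : Int) < (fh.countP (fun v => decide (v < 0)) : Int))
        then "man-in-a-hole" else "icarus"
      else (if 0 < pvLastD 0 nz then "cinderella" else "oedipus")
    (shape, reversals, decide (2 ≤ reversals))

theorem pvVal_cases (s : String) : pvVal s = 1 ∨ pvVal s = -1 ∨ pvVal s = 0 := by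
  unfold pvVal; dsimp only; split_ifs <;> simp

theorem pvNZ_pm (shifts : List String) : ∀ v ∈ pvNZ shifts, v = 1 ∨ v = -1 := by
  intro v hv
  unfold pvNZ at hv
  rcases List.mem_filter.mp hv with ⟨hm, hnz⟩
  rcases List.mem_map.mp hm with ⟨s, _, rfl⟩
  rcases pvVal_cases s with h | h | h <;> simp_all

theorem pvNZ_ne_zero (shifts : List String) : ∀ v ∈ pvNZ shifts, v ≠ 0 := by
  intro v hv
  rcases pvNZ_pm shifts v hv with rfl | rfl <;> norm_num

theorem pvLastD_eq_getLast (l : List Int) (last : Int) (h : l ≠ []) :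
    pvLastD last l = l.getLast h := by
  induction l generalizing last with
  | nil => exact absurd rfl h
  | cons x xs ih =>
    cases xs with
    | nil => rfl
    | cons y ys => simpa [pvLastD] using ih x (by simp)

theorem pvRevFrom_append (l : List Int) (x last : Int) :
    pvRevFrom last (l ++ [x]) =
      pvRevFrom last l + (if pvLastD last l ≠ 0 ∧ x ≠ pvLastD last l then 1 else 0) := by
  induction l generalizing last with
  | nil => simp [pvRevFrom, pvLastD]
  | cons y ys ih => simp only [List.cons_append, pvRevFrom, pvLastD, ih y]; split_ifs <;> ring

theorem pvGetD_append_lt (l : List Int) (x : Int) (i : Int) (h0 : 0 ≤ i) (h1 : i < (l.length : Int)) :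
    PySem.List.pyGetD (l ++ [x]) i 0 = PySem.List.pyGetD l i 0 := by
  rw [PySem.List.pyGetD_eq_getElem _ _ h0 (by simp; omega),
      PySem.List.pyGetD_eq_getElem _ _ h0 h1,
      List.getElem_append_left (by omega)]

theorem pvRevloop_eq (l : List Int) (h : ∀ v ∈ l, v ≠ 0) :
    (PySem.List.pyRange 1 (l.length : Int) 1).foldl
      (fun r i => if PySem.List.pyGetD l i 0 ≠ PySem.List.pyGetD l (i - 1) 0 then r + 1 else r) 0
      = pvRevFrom 0 l := by
  induction l using List.reverseRecOn with
  | nil => simp [PySem.List.pyRange_one_eq_nil (by norm_num : (0:Int) ≤ 1), pvRevFrom]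
  | append_singleton l x ih =>
    rcases eq_or_ne l [] with rfl | hne
    · simp [PySem.List.pyRange_one_eq_nil (by norm_num : (1:Int) ≤ 1), pvRevFrom]
    · have hlen : 1 ≤ (l.length : Int) := by
        have := List.length_pos_iff.mpr hne; omega
      have hcast : ((l ++ [x]).length : Int) = (l.length : Int) + 1 := by simp
      rw [hcast, PySem.List.pyRange_one_succ_right hlen, List.foldl_append]
      have hinner : List.foldl
          (fun r i => if PySem.List.pyGetD (l ++ [x]) i 0 ≠ PySem.List.pyGetD (l ++ [x]) (i - 1) 0 then r + 1 else r) (0 : Int)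
          (PySem.List.pyRange 1 (l.length : Int)) = List.foldl
          (fun r i => if PySem.List.pyGetD l i 0 ≠ PySem.List.pyGetD l (i - 1) 0 then r + 1 else r) (0 : Int)
          (PySem.List.pyRange 1 (l.length : Int)) := by
        refine PySem.List.foldl_congr_mem _ _ _ _ ?_
        intro acc i hi
        rcases PySem.List.mem_pyRange_one.mp hi with ⟨hi1, hi2⟩
        rw [pvGetD_append_lt _ _ _ (by omega) hi2,
            pvGetD_append_lt _ _ _ (by omega) (by omega)]
      simp only [List.foldl_cons, List.foldl_nil]
      rw [hinner, ih (fun v hv => h v (by simp [hv]))]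
      have hlast : PySem.List.pyGetD (l ++ [x]) ((l.length : Int) - 1) 0 = l.getLast hne := by
        rw [pvGetD_append_lt _ _ _ (by omega) (by omega),
            PySem.List.pyGetD_eq_getElem _ _ (by omega) (by omega),
            List.getLast_eq_getElem]
        congr 1
        omega
      have hx : PySem.List.pyGetD (l ++ [x]) (l.length : Int) 0 = x := by
        rw [PySem.List.pyGetD_eq_getElem _ _ (by omega) (by simp)]
        simp
      have hgl : l.getLast hne ≠ 0 := h _ (by simp [List.getLast_mem])
      rw [pvRevFrom_append]
      rw [hx, hlast, pvLastD_eq_getLast _ _ hne]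
      simp [hgl]
      split_ifs <;> simp_all

theorem pvCount_sum (l : List Int) (p : Int → Bool) :
    ((l.filter p).map (fun _ => (1 : Int))).sum = (l.countP p : Int) := by
  rw [PySem.List.sum_map_const_int]
  simp [List.countP_eq_length_filter]

theorem pvA_valences (shifts : List String) :
    shifts.foldl (fun acc s =>
      let t := PySem.Str.strip s
      if pvPos.contains t then acc ++ [1]
      else if pvNeg.contains t then acc ++ [(-1 : Int)]
      else acc ++ [0]) [] = shifts.map pvVal := by
  rw [PySem.List.foldl_congr_mem _ _ (fun acc s => acc ++ [pvVal s]) _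
      (by intro acc s _; unfold pvVal; dsimp only; split_ifs <;> rfl)]
  simpa using PySem.List.foldl_append_singleton_eq_map pvVal shifts ([] : List Int)

theorem pvA_eq_canon (shifts : List String) :
    classify_arc_shape_py shifts = pvCanon (pvNZ shifts) := by
  unfold classify_arc_shape_py pvCanon
  simp only [pvA_valences]
  rw [show List.filter (fun v => decide (v ≠ 0)) (List.map pvVal shifts) = pvNZ shifts from rfl]
  by_cases he : (pvNZ shifts).isEmpty
  · simp [he]
  · have hne : pvNZ shifts ≠ [] := by simpa [List.isEmpty_iff] using he
    simp only [he]
    rw [pvRevloop_eq _ (pvNZ_ne_zero shifts), pvCount_sum, pvCount_sum, pvCount_sum, pvCount_sum,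
        PySem.List.pyGetD_neg_one _ _ hne, ← pvLastD_eq_getLast _ 0 hne]

theorem pvUpd_inv (l : List Int) (acc : List Int) (r p n last : Int) (h : ∀ v ∈ l, v ≠ 0) :
    l.foldl pvUpd (acc, r, p, n, last) =
      (acc ++ l, r + pvRevFrom last l,
       p + (l.countP (fun v => decide (0 < v)) : Int),
       n + (l.countP (fun v => decide (v < 0)) : Int),
       pvLastD last l) := by
  induction l generalizing acc r p n last with
  | nil => simp [pvRevFrom, pvLastD]
  | cons x xs ih =>
    have hx : x ≠ 0 := h x (by simp)
    rw [List.foldl_cons, show pvUpd (acc, r, p, n, last) x =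
      (acc ++ [x], (if last ≠ 0 ∧ x ≠ last then r + 1 else r),
       (if 0 < x then p + 1 else p), (if 0 < x then n else n + 1), x) from rfl,
      ih _ _ _ _ _ (fun v hv => h v (by simp [hv]))]
    simp only [Prod.mk.injEq, List.countP_cons, pvRevFrom, pvLastD, List.append_assoc,
      List.singleton_append]
    refine ⟨trivial, ?_, ?_, ?_, trivial⟩ <;> split_ifs <;> simp_all <;> omega

theorem pvStepB_eq (st : List Int × Int × Int × Int × Int) (s : String) :
    pvStepB st s = if pvVal s = 0 then st else pvUpd st (pvVal s) := by
  unfold pvStepB pvVal; dsimp only; split_ifs <;> simp_all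

theorem pvB_fold (shifts : List String) (h : ∀ v ∈ pvNZ shifts, v ≠ 0) :
    shifts.foldl pvStepB ([], 0, 0, 0, 0) =
      (pvNZ shifts, pvRevFrom 0 (pvNZ shifts),
       ((pvNZ shifts).countP (fun v => decide (0 < v)) : Int),
       ((pvNZ shifts).countP (fun v => decide (v < 0)) : Int),
       pvLastD 0 (pvNZ shifts)) := by
  have h1 : shifts.foldl pvStepB ([], 0, 0, 0, 0)
      = (shifts.map pvVal).foldl (fun st v => if v = 0 then st else pvUpd st v) ([], 0, 0, 0, 0) := by
    rw [List.foldl_map]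
    exact PySem.List.foldl_congr_mem _ _ _ _ (fun acc x _ => pvStepB_eq acc x)
  have h2 : (shifts.map pvVal).foldl (fun st v => if v = 0 then st else pvUpd st v) ([], 0, 0, 0, 0)
      = (pvNZ shifts).foldl pvUpd ([], 0, 0, 0, 0) := by
    rw [show (fun (st : List Int × Int × Int × Int × Int) (v : Int) => if v = 0 then st else pvUpd st v)
        = (fun st v => if v ≠ 0 then pvUpd st v else st) from by funext st v; rw [ite_not]]
    exact PySem.List.foldl_ite_eq_foldl_filter _ _ _ _
  rw [h1, h2, pvUpd_inv _ _ _ _ _ _ h]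
  simp

theorem pvSum_pm (l : List Int) (h : ∀ v ∈ l, v = 1 ∨ v = -1) :
    l.sum = (l.countP (fun v => decide (0 < v)) : Int) - (l.countP (fun v => decide (v < 0)) : Int) := by
  induction l with
  | nil => simp
  | cons x xs ih =>
    have hx := h x (by simp)
    have ih' := ih (fun v hv => h v (by simp [hv]))
    rcases hx with rfl | rfl <;> simp [ih'] <;> ring

theorem pvHalf_iff (nz : List Int) (hpm : ∀ v ∈ nz, v = 1 ∨ v = -1) :
    ((PySem.List.slice nz none (some (if PySem.Int.floordiv (nz.length : Int) 2 = 0 then 1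
        else PySem.Int.floordiv (nz.length : Int) 2))).sum < 0) ↔
    (((PySem.List.slice nz none (some (if PySem.Int.floordiv (nz.length : Int) 2 = 0 then 1
        else PySem.Int.floordiv (nz.length : Int) 2))).countP (fun v => decide (0 < v)) : Int) <
     ((PySem.List.slice nz none (some (if PySem.Int.floordiv (nz.length : Int) 2 = 0 then 1
        else PySem.Int.floordiv (nz.length : Int) 2))).countP (fun v => decide (v < 0)) : Int)) := by
  set half : Int := if PySem.Int.floordiv ((nz : List Int).length : Int) 2 = 0 then 1
    else PySem.Int.floordiv ((nz : List Int).length : Int) 2 with hhalf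
  have h05 : 0 ≤ half := by
    rw [hhalf, PySem.Int.floordiv_eq_ediv_of_pos (by norm_num)]
    split_ifs <;> positivity
  have hslice : PySem.List.slice nz none (some half) = nz.take half.toNat := by
    rw [show half = ((half.toNat : Nat) : Int) by omega, PySem.List.slice_to_natCast]
    simp
    omega
  rw [hslice, pvSum_pm _ (fun v hv => hpm v (List.mem_of_mem_take hv))]
  omega

theorem pvB_eq_canon (shifts : List String) :
    classify_arc_shape_py_alt shifts = pvCanon (pvNZ shifts) := by
  unfold classify_arc_shape_py_alt
  rw [pvB_fold shifts (pvNZ_ne_zero shifts)]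
  unfold pvCanon
  dsimp only
  rw [if_congr (pvHalf_iff (pvNZ shifts) (pvNZ_pm shifts)) rfl rfl]

-- ===== VERDICT (by name: the statement is the Claim_ definition above) =====
theorem classify_arc_shape_py_spec : Claim_equal_classify_arc_shape_py := by
  intro shifts _
  unfold Spec_classify_arc_shape_py
  rw [pvA_eq_canon, pvB_eq_canon]
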